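-- pv_equiv track=rewrite | github.com/yashpandey474/Competitive-Coding | Python/Graph/largest_component.py | largestComponent
-- ===== SOURCE A (Python) =====
-- from math import gcd
--
-- def largestComponent(arr, n):
--     #CREATE THE GRAPH
--     graph = {i: [] for i in range(n)}
--
--     for i in range(n):
--         for j in range(i + 1, n):
--             if gcd(arr[i], arr[j]) > 1:
--                 graph[i].append(j)
--                 graph[j].append(i)
--
--
--     #FIND COMPONENT SIZES
--     max_size = 1
--     visited = set()
--
--     def dfs(start):
--         count = 1
--         visited.add(start)
--
--         for v in graph[start]:
--             if v not in visited:
--                 count += dfs(v)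
--
--         return count
--
--
--     for i in range(n):
--         if i not in visited:
--             max_size = max(max_size, dfs(i))
--
--     return max_size
-- ===== SOURCE B (Python) =====
-- from math import gcd
--
-- def largestComponent(arr, n):
--     # Iterative flood fill with an explicit stack; neighbours are tested
--     # on demand with gcd, so no adjacency structure is ever built.
--     visited = set()
--     best = 1
--     for i in range(n):
--         if i not in visited:
--             visited.add(i)
--             size = 1
--             stack = [i]
--             while stack:
--                 j = stack.pop()
--                 for k in range(n):
--                     if k not in visited and gcd(arr[j], arr[k]) > 1:
--                         visited.add(k)
--                         stack.append(k)
--                         size += 1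
--             best = max(best, size)
--     return best
-- ===== Notes on version B (the rewrite author's own statement) =====
-- stated objective: alternative
-- what changed: Replaced the precomputed adjacency-dict plus recursive DFS with a single pass that flood-fills each component using an explicit stack, testing gcd-neighbours on demand, so no graph is ever built and no recursion is used.
import Mathlib
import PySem

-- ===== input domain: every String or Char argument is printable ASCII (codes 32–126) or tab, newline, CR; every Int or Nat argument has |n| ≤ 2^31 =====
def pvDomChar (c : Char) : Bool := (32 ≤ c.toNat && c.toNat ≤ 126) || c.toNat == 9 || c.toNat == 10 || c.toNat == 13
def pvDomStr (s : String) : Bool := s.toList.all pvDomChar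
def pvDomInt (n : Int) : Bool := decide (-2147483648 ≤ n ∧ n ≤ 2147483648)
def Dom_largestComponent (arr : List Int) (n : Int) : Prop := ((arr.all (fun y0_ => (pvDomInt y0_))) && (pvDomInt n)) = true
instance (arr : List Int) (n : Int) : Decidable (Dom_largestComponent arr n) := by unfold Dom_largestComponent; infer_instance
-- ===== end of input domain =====

-- B replaces A's adjacency-dict + recursive DFS by an explicit-stack flood fill that
-- tests gcd-neighbours on demand (no graph built, no recursion); objective: alternative.

-- math.gcd(a, b) = gcd(|a|, |b|) ≥ 0; exact.
def pyGcd (a b : Int) : Int := (Int.gcd a b : Int)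

-- ===== PORT A =====
-- graph = {i: [] for i in range(n)}; then the double loop appending both directions.
-- arr[i] is PySem.List.pyGetD arr i 0: Pre_ guarantees every accessed index is in range.
def buildGraphA (arr : List Int) (n : Int) : PySem.Dict Int (List Int) :=
  let g0 := (PySem.List.pyRange 0 n 1).foldl (fun d i => d.insert i ([] : List Int)) PySem.Dict.empty
  (PySem.List.pyRange 0 n 1).foldl (fun g i =>
    (PySem.List.pyRange (i + 1) n 1).foldl (fun g j =>
      if 1 < pyGcd (PySem.List.pyGetD arr i 0) (PySem.List.pyGetD arr j 0) then
        (g.modify i [] (fun l => l ++ [j])).modify j [] (fun l => l ++ [i])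
      else g) g) g0

-- def dfs(start): count = 1; visited.add(start); for v in graph[start]: if v not in visited: count += dfs(v).
-- graph[start] is g.getD start [] (exact: start is always a key, keys = range(n)).
-- Python's recursion is bounded by the number of unvisited nodes; the fuel n.toNat+1
-- is never exhausted (proved in the lemmas below), so this computes exactly A's dfs.
def dfsA (g : PySem.Dict Int (List Int)) : Nat → Int → PySem.Set Int → Int × PySem.Set Int
  | 0, _, vis => (1, vis)
  | fuel + 1, start, vis =>
    (g.getD start []).foldl
      (fun (p : Int × PySem.Set Int) v =>
        if PySem.Set.contains p.2 v then p
        else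
          let r := dfsA g fuel v p.2
          (p.1 + r.1, r.2))
      (1, PySem.Set.add vis start)

def largestComponent (arr : List Int) (n : Int) : Int :=
  let graph := buildGraphA arr n
  let res := (PySem.List.pyRange 0 n 1).foldl
    (fun (st : Int × PySem.Set Int) i =>
      if PySem.Set.contains st.2 i then st
      else
        let r := dfsA graph (n.toNat + 1) i st.2
        (max st.1 r.1, r.2))
    (1, PySem.Set.empty)
  res.1

-- ===== PORT B =====
-- while stack: j = stack.pop(); for k in range(n): if k not in visited and gcd(arr[j], arr[k]) > 1: mark, push, count.
-- The while loop runs at most 2*n+1 iterations (each pops one entry; pushes are fresh marks),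
-- so the fuel 2*n.toNat+2 is never exhausted (proved below).
def bfsB (arr : List Int) (n : Int) : Nat → List Int → PySem.Set Int → Int → Int × PySem.Set Int
  | 0, _, vis, size => (size, vis)
  | fuel + 1, stack, vis, size =>
    match stack.getLast? with
    | none => (size, vis)
    | some j =>
      let st := (PySem.List.pyRange 0 n 1).foldl
        (fun (st : List Int × PySem.Set Int × Int) k =>
          if PySem.Set.contains st.2.1 k then st
          else if 1 < pyGcd (PySem.List.pyGetD arr j 0) (PySem.List.pyGetD arr k 0) then
            (st.1 ++ [k], PySem.Set.add st.2.1 k, st.2.2 + 1)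
          else st)
        (stack.dropLast, vis, size)
      bfsB arr n fuel st.1 st.2.1 st.2.2

def largestComponent_alt (arr : List Int) (n : Int) : Int :=
  ((PySem.List.pyRange 0 n 1).foldl
    (fun (st : Int × PySem.Set Int) i =>
      if PySem.Set.contains st.2 i then st
      else
        let r := bfsB arr n (2 * n.toNat + 2) [i] (PySem.Set.add st.2 i) 1
        (max st.1 r.1, r.2))
    (1, PySem.Set.empty)).1

-- ===== PRECONDITION & SPEC =====
-- Pre_ excludes exactly the inputs where Python A raises IndexError: n ≥ 2 together with
-- n > len(arr) makes the pair loop read arr[j] past the end.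
def Pre_largestComponent (arr : List Int) (n : Int) : Prop := n ≤ (arr.length : Int) ∨ n < 2
instance (arr : List Int) (n : Int) : Decidable (Pre_largestComponent arr n) := by unfold Pre_largestComponent; infer_instance
def pvWitness_largestComponent : List Int × Int := ([2, 4, 3], 3)

def Spec_largestComponent (arr : List Int) (n : Int) (out : Int) : Prop := out = largestComponent_alt arr n
instance (arr : List Int) (n : Int) (out : Int) : Decidable (Spec_largestComponent arr n out) := by unfold Spec_largestComponent; infer_instance

-- ===== CLAIM (what is proved, stated in full; the proofs are below) =====
def Claim_equal_largestComponent : Prop := ∀ (arr : List Int) (n : Int), Dom_largestComponent arr n → Pre_largestComponent arr n → Spec_largestComponent arr n (largestComponent arr n)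


-- ===== LEMMAS AND PROOFS =====

-- reflexive-transitive closure of a relation on Int (self-contained)
inductive pvRTG (r : Int → Int → Prop) : Int → Int → Prop
  | refl {a : Int} : pvRTG r a a
  | tail {a b c : Int} : pvRTG r a b → r b c → pvRTG r a c

theorem pvRTG_head {r : Int → Int → Prop} {a b c : Int} (h1 : r a b) (h2 : pvRTG r b c) :
    pvRTG r a c := by
  induction h2 with
  | refl => exact pvRTG.tail pvRTG.refl h1
  | tail _ hbc ih => exact pvRTG.tail ih hbc

-- The shared-prime-factor edge relation on indices 0 ≤ i, j < n.
def pvEdge (arr : List Int) (n : Int) (i j : Int) : Prop :=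
  0 ≤ i ∧ i < n ∧ 0 ≤ j ∧ j < n ∧ i ≠ j ∧
    1 < pyGcd (PySem.List.pyGetD arr i 0) (PySem.List.pyGetD arr j 0)

def pvReach (arr : List Int) (n : Int) : Int → Int → Prop := pvRTG (pvEdge arr n)

def pvSubR (n : Int) (V : List Int) : Prop := ∀ x ∈ V, 0 ≤ x ∧ x < n
def pvClosed (arr : List Int) (n : Int) (V : List Int) : Prop :=
  ∀ x ∈ V, ∀ y, pvEdge arr n x y → y ∈ V
-- number of still-unvisited indices in range(n)
def pvU (n : Int) (V : List Int) : Nat :=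
  ((PySem.List.pyRange 0 n 1).filter (fun x => decide (x ∉ V))).length

theorem pvReach_mem_closed (arr : List Int) (n : Int) {W : List Int} (hC : pvClosed arr n W)
    {s x : Int} (hs : s ∈ W) (h : pvReach arr n s x) : x ∈ W := by
  induction h with
  | refl => exact hs
  | tail _ hbc ih => exact hC _ ih _ hbc

-- two duplicate-free lists with the same members have the same length
theorem pvLenEq : ∀ (l1 l2 : List Int), l1.Nodup → l2.Nodup → (∀ x, x ∈ l1 ↔ x ∈ l2) →
    l1.length = l2.length := by
  intro l1
  induction l1 with
  | nil =>
    intro l2 _ _ h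
    cases l2 with
    | nil => rfl
    | cons b t => exact absurd ((h b).mpr List.mem_cons_self) List.not_mem_nil
  | cons a t ih =>
    intro l2 hnd1 hnd2 h
    have hat : a ∉ t := (List.nodup_cons.mp hnd1).1
    have hndt : t.Nodup := (List.nodup_cons.mp hnd1).2
    have ha2 : a ∈ l2 := (h a).mp List.mem_cons_self
    have hnd2' : (l2.filter (fun x => x != a)).Nodup := hnd2.filter _
    have hmem' : ∀ x, x ∈ t ↔ x ∈ l2.filter (fun x => x != a) := by
      intro x
      rw [List.mem_filter]
      constructor
      · intro hx
        have hxa : x ≠ a := fun he => hat (he ▸ hx)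
        exact ⟨(h x).mp (List.mem_cons_of_mem _ hx), by simpa using hxa⟩
      · rintro ⟨hx1, hx2⟩
        have hxa : x ≠ a := by simpa using hx2
        rcases List.mem_cons.mp ((h x).mpr hx1) with rfl | hx'
        · exact absurd rfl hxa
        · exact hx'
    have hlf : (l2.filter (fun x => x != a)).length = l2.length - 1 := by
      rw [← hnd2.erase_eq_filter a, List.length_erase_of_mem ha2]
    have hpos : 0 < l2.length := List.length_pos_of_mem ha2
    have hih := ih _ hndt hnd2' hmem'
    simp only [List.length_cons]
    omega

theorem pvFilterMono {p q : Int → Bool} (h : ∀ x, p x = true → q x = true) :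
    ∀ l : List Int, (l.filter p).length ≤ (l.filter q).length := by
  intro l
  induction l with
  | nil => simp
  | cons a t ih =>
    by_cases hp : p a = true
    · simp [hp, h a hp]
      omega
    · by_cases hq : q a = true
      · simp [hp, hq]
        omega
      · simp [hp, hq]
        omega

theorem pvU_mono (n : Int) {V V' : List Int} (h : ∀ x ∈ V, x ∈ V') : pvU n V' ≤ pvU n V := by
  unfold pvU
  refine pvFilterMono ?_ _
  intro x hx
  simp only [decide_eq_true_eq] at hx ⊢
  intro hxV
  exact hx (h x hxV)

theorem pvU_append_eq (n : Int) {V : List Int} {s : Int} (h0 : 0 ≤ s) (h1 : s < n) (hs : s ∉ V) :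
    pvU n (V ++ [s]) + 1 = pvU n V := by
  unfold pvU
  have hfe : (PySem.List.pyRange 0 n 1).filter (fun x => decide (x ∉ V ++ [s]))
      = ((PySem.List.pyRange 0 n 1).filter (fun x => decide (x ∉ V))).filter (fun x => x != s) := by
    rw [List.filter_filter]
    refine List.filter_congr ?_
    intro x _
    by_cases hxv : x ∈ V <;> by_cases hxs : x = s <;> simp [hxv, hxs]
  have hnd : ((PySem.List.pyRange 0 n 1).filter (fun x => decide (x ∉ V))).Nodup :=
    (PySem.List.nodup_pyRange_one 0 n).filter _
  have hmem : s ∈ (PySem.List.pyRange 0 n 1).filter (fun x => decide (x ∉ V)) := by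
    refine List.mem_filter.mpr ⟨?_, by simpa using hs⟩
    exact (PySem.List.mem_pyRange_one).mpr ⟨h0, h1⟩
  rw [hfe, ← hnd.erase_eq_filter s, List.length_erase_of_mem hmem]
  have hpos : 0 < ((PySem.List.pyRange 0 n 1).filter (fun x => decide (x ∉ V))).length :=
    List.length_pos_of_mem hmem
  omega

theorem pvU_le (n : Int) (V : List Int) : pvU n V ≤ n.toNat := by
  unfold pvU
  calc ((PySem.List.pyRange 0 n 1).filter _).length
      ≤ (PySem.List.pyRange 0 n 1).length := List.length_filter_le _ _
    _ = n.toNat := by rw [PySem.List.length_pyRange_one]; simp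

theorem pvU_pos (n : Int) {V : List Int} {s : Int} (h0 : 0 ≤ s) (h1 : s < n) (hs : s ∉ V) :
    1 ≤ pvU n V := by
  unfold pvU
  have hmem : s ∈ (PySem.List.pyRange 0 n 1).filter (fun x => decide (x ∉ V)) := by
    refine List.mem_filter.mpr ⟨?_, by simpa using hs⟩
    exact (PySem.List.mem_pyRange_one).mpr ⟨h0, h1⟩
  exact List.length_pos_of_mem hmem

theorem pvExistsCons {α : Type} {a : α} {l : List α} {C : α → Prop} :
    (∃ w ∈ a :: l, C w) ↔ C a ∨ ∃ w ∈ l, C w := by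
  constructor
  · rintro ⟨w, hw, h⟩
    rcases List.mem_cons.mp hw with rfl | hw'
    · exact Or.inl h
    · exact Or.inr ⟨w, hw', h⟩
  · rintro (h | ⟨w, hw, h⟩)
    · exact ⟨a, List.mem_cons_self, h⟩
    · exact ⟨w, List.mem_cons_of_mem _ hw, h⟩

-- ----- graph construction -----

def pvPairList (n : Int) : List (Int × Int) :=
  (PySem.List.pyRange 0 n 1).flatMap (fun i => (PySem.List.pyRange (i + 1) n 1).map (fun j => (i, j)))

def pvPairStep (arr : List Int) (g : PySem.Dict Int (List Int)) (p : Int × Int) : PySem.Dict Int (List Int) :=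
  if 1 < pyGcd (PySem.List.pyGetD arr p.1 0) (PySem.List.pyGetD arr p.2 0) then
    (g.modify p.1 [] (fun l => l ++ [p.2])).modify p.2 [] (fun l => l ++ [p.1])
  else g

def pvInitDict (n : Int) : PySem.Dict Int (List Int) :=
  (PySem.List.pyRange 0 n 1).foldl (fun d i => d.insert i ([] : List Int)) PySem.Dict.empty

theorem pvFoldlNest {γ : Type} (l : List Int) (f : Int → List Int) (step : γ → Int × Int → γ) (g : γ) :
    l.foldl (fun g i => (f i).foldl (fun g j => step g (i, j)) g) g
      = (l.flatMap (fun i => (f i).map (fun j => (i, j)))).foldl step g := by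
  induction l generalizing g with
  | nil => rfl
  | cons a t ih => simp [List.flatMap_cons, List.foldl_append, List.foldl_map, ih]

theorem pvGetD_initDict (n : Int) (x : Int) : (pvInitDict n).getD x [] = [] := by
  unfold pvInitDict
  have key : ∀ (l : List Int) (d : PySem.Dict Int (List Int)), (∀ z : Int, d.getD z [] = []) →
      ∀ z : Int, (l.foldl (fun d i => d.insert i ([] : List Int)) d).getD z [] = [] := by
    intro l
    induction l with
    | nil => intro d hd z; exact hd z
    | cons a t ih =>
      intro d hd z
      refine ih _ ?_ z
      intro w
      rw [PySem.Dict.getD_insert]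
      split <;> simp [hd]
  exact key _ _ (fun z => by simp [PySem.Dict.getD_empty]) x

theorem pvBuildGraphA_eq (arr : List Int) (n : Int) :
    buildGraphA arr n = (pvPairList n).foldl (pvPairStep arr) (pvInitDict n) := by
  unfold buildGraphA pvPairList pvInitDict
  exact pvFoldlNest (PySem.List.pyRange 0 n 1) (fun i => PySem.List.pyRange (i + 1) n 1) (pvPairStep arr) _

-- membership after the symmetric double append
theorem pvMem_modmod (g : PySem.Dict Int (List Int)) {a b : Int} (hab : a ≠ b) (x y : Int) :
    (y ∈ ((g.modify a [] (fun l => l ++ [b])).modify b [] (fun l => l ++ [a])).getD x [] ↔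
      y ∈ g.getD x [] ∨ (x = a ∧ y = b) ∨ (x = b ∧ y = a)) := by
  have e2 : ((g.modify a [] (fun l => l ++ [b])).modify b [] (fun l => l ++ [a])).getD x []
      = if x = b then (if (b : Int) = a then g.getD a [] ++ [b] else g.getD b []) ++ [a]
        else if x = a then g.getD a [] ++ [b] else g.getD x [] := by
    rw [PySem.Dict.getD_modify, PySem.Dict.getD_modify, PySem.Dict.getD_modify]
  rw [e2]
  by_cases hxb : x = b
  · subst hxb
    rw [if_pos rfl, if_neg (fun h => hab h.symm)]
    constructor
    · intro h
      rcases List.mem_append.mp h with h' | h'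
      · exact Or.inl h'
      · have : y = a := by simpa using h'
        exact Or.inr (Or.inr ⟨rfl, this⟩)
    · rintro (h | ⟨hxa, _⟩ | ⟨_, rfl⟩)
      · exact List.mem_append.mpr (Or.inl h)
      · exact absurd hxa.symm hab
      · exact List.mem_append.mpr (Or.inr (by simp))
  · rw [if_neg hxb]
    by_cases hxa : x = a
    · subst hxa
      rw [if_pos rfl]
      constructor
      · intro h
        rcases List.mem_append.mp h with h' | h'
        · exact Or.inl h'
        · have : y = b := by simpa using h'
          exact Or.inr (Or.inl ⟨rfl, this⟩)
      · rintro (h | ⟨_, rfl⟩ | ⟨hxb', _⟩)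
        · exact List.mem_append.mpr (Or.inl h)
        · exact List.mem_append.mpr (Or.inr (by simp))
        · exact absurd hxb' hxb
    · rw [if_neg hxa]
      constructor
      · exact fun h => Or.inl h
      · rintro (h | ⟨hxa', _⟩ | ⟨hxb', _⟩)
        · exact h
        · exact absurd hxa' hxa
        · exact absurd hxb' hxb

theorem pvMem_pairFold (arr : List Int) :
    ∀ (L : List (Int × Int)) (g : PySem.Dict Int (List Int)), (∀ p ∈ L, p.1 ≠ p.2) → ∀ x y : Int,
      (y ∈ (L.foldl (pvPairStep arr) g).getD x [] ↔
        y ∈ g.getD x [] ∨ ∃ p ∈ L, 1 < pyGcd (PySem.List.pyGetD arr p.1 0) (PySem.List.pyGetD arr p.2 0) ∧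
          ((x = p.1 ∧ y = p.2) ∨ (x = p.2 ∧ y = p.1))) := by
  intro L
  induction L with
  | nil => intro g _ x y; simp
  | cons p t ih =>
    intro g hne x y
    have hpt : p.1 ≠ p.2 := hne p List.mem_cons_self
    have hne' : ∀ q ∈ t, q.1 ≠ q.2 := fun q hq => hne q (List.mem_cons_of_mem _ hq)
    rw [List.foldl_cons]
    by_cases hc : 1 < pyGcd (PySem.List.pyGetD arr p.1 0) (PySem.List.pyGetD arr p.2 0)
    · have hstep : pvPairStep arr g p
          = (g.modify p.1 [] (fun l => l ++ [p.2])).modify p.2 [] (fun l => l ++ [p.1]) := by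
        unfold pvPairStep
        rw [if_pos hc]
      rw [hstep, ih _ hne' x y, pvMem_modmod _ hpt x y, pvExistsCons]
      constructor
      · rintro ((h | h) | h)
        · exact Or.inl h
        · exact Or.inr (Or.inl ⟨hc, h⟩)
        · exact Or.inr (Or.inr h)
      · rintro (h | ⟨_, h⟩ | h)
        · exact Or.inl (Or.inl h)
        · exact Or.inl (Or.inr h)
        · exact Or.inr h
    · have hstep : pvPairStep arr g p = g := by
        unfold pvPairStep
        rw [if_neg hc]
      rw [hstep, ih _ hne' x y, pvExistsCons]
      constructor
      · rintro (h | h)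
        · exact Or.inl h
        · exact Or.inr (Or.inr h)
      · rintro (h | ⟨hc', _⟩ | h)
        · exact Or.inl h
        · exact absurd hc' hc
        · exact Or.inr h

theorem pvMem_pairList (n : Int) (p : Int × Int) :
    p ∈ pvPairList n ↔ 0 ≤ p.1 ∧ p.1 < p.2 ∧ p.2 < n := by
  obtain ⟨a, b⟩ := p
  unfold pvPairList
  simp only [List.mem_flatMap, List.mem_map, PySem.List.mem_pyRange_one]
  constructor
  · rintro ⟨i, ⟨hi0, hin⟩, j, ⟨hj1, hj2⟩, heq⟩
    obtain ⟨rfl, rfl⟩ : i = a ∧ j = b :=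
      ⟨congrArg Prod.fst heq, congrArg Prod.snd heq⟩
    exact ⟨hi0, by omega, hj2⟩
  · rintro ⟨h0, h1, h2⟩
    exact ⟨a, ⟨h0, by omega⟩, b, ⟨by omega, h2⟩, rfl⟩

-- graph characterisation: membership in buildGraphA's adjacency lists is exactly pvEdge
theorem mem_buildGraphA (arr : List Int) (n : Int) (x y : Int) :
    y ∈ (buildGraphA arr n).getD x [] ↔ pvEdge arr n x y := by
  rw [pvBuildGraphA_eq]
  have hne : ∀ p ∈ pvPairList n, p.1 ≠ p.2 := by
    intro p hp
    have := (pvMem_pairList n p).mp hp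
    omega
  rw [pvMem_pairFold arr _ _ hne x y, pvGetD_initDict]
  simp only [List.not_mem_nil, false_or]
  constructor
  · rintro ⟨p, hp, hgcd, hcase⟩
    have hpl := (pvMem_pairList n p).mp hp
    rcases hcase with ⟨rfl, rfl⟩ | ⟨rfl, rfl⟩
    · exact ⟨by omega, by omega, by omega, by omega, by omega, hgcd⟩
    · refine ⟨by omega, by omega, by omega, by omega, by omega, ?_⟩
      simpa [pyGcd, Int.gcd_comm] using hgcd
  · rintro ⟨hx0, hxn, hy0, hyn, hxy, hgcd⟩
    rcases Int.lt_or_lt_of_ne hxy with hlt | hgt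
    · exact ⟨(x, y), (pvMem_pairList n _).mpr ⟨by omega, by omega, by omega⟩, hgcd, Or.inl ⟨rfl, rfl⟩⟩
    · refine ⟨(y, x), (pvMem_pairList n _).mpr ⟨by omega, by omega, by omega⟩, ?_, Or.inr ⟨rfl, rfl⟩⟩
      simpa [pyGcd, Int.gcd_comm] using hgcd

-- ----- A's dfs -----

-- the loop body of A's dfs, named so the proofs can rewrite with it
def pvDfsStep (g : PySem.Dict Int (List Int)) (fuel : Nat) :
    Int × PySem.Set Int → Int → Int × PySem.Set Int := fun p v =>
  if PySem.Set.contains p.2 v then p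
  else
    let r := dfsA g fuel v p.2
    (p.1 + r.1, r.2)

theorem pvDfsA_succ (g : PySem.Dict Int (List Int)) (fuel : Nat) (s : Int) (V : PySem.Set Int) :
    dfsA g (fuel + 1) s V = (g.getD s []).foldl (pvDfsStep g fuel) (1, PySem.Set.add V s) := rfl

theorem dfsA_spec (arr : List Int) (n : Int) (g : PySem.Dict Int (List Int))
    (Hg : ∀ x y : Int, y ∈ g.getD x [] ↔ pvEdge arr n x y) :
    ∀ (fuel : Nat) (s : Int) (V : PySem.Set Int), V.Nodup → pvSubR n V → s ∉ V →
      0 ≤ s → s < n → pvU n V ≤ fuel →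
      ((dfsA g fuel s V).2.Nodup ∧ (∀ x ∈ V, x ∈ (dfsA g fuel s V).2) ∧
       s ∈ (dfsA g fuel s V).2 ∧ pvSubR n (dfsA g fuel s V).2 ∧
       (∀ x ∈ (dfsA g fuel s V).2, x ∈ V ∨ pvReach arr n s x) ∧
       (∀ x ∈ (dfsA g fuel s V).2, x ∉ V → ∀ y, pvEdge arr n x y → y ∈ (dfsA g fuel s V).2) ∧
       (dfsA g fuel s V).1 = ((dfsA g fuel s V).2.length : Int) - (V.length : Int)) := by
  intro fuel
  induction fuel with
  | zero =>
    intro s V _ _ hs h0 h1 hu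
    exact absurd hu (by have := pvU_pos n h0 h1 hs; omega)
  | succ fuel ih =>
    intro s V hnd hsub hs h0 h1 hu
    -- the inner loop over the neighbour list
    have fold : ∀ (ns : List Int) (c0 : Int) (V0 : PySem.Set Int),
        V0.Nodup → pvSubR n V0 → pvU n V0 ≤ fuel → (∀ v ∈ ns, pvEdge arr n s v) →
        ((ns.foldl (pvDfsStep g fuel) (c0, V0)).2.Nodup ∧
         (∀ x ∈ V0, x ∈ (ns.foldl (pvDfsStep g fuel) (c0, V0)).2) ∧
         pvSubR n (ns.foldl (pvDfsStep g fuel) (c0, V0)).2 ∧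
         (∀ x ∈ (ns.foldl (pvDfsStep g fuel) (c0, V0)).2, x ∈ V0 ∨ pvReach arr n s x) ∧
         (∀ x ∈ (ns.foldl (pvDfsStep g fuel) (c0, V0)).2, x ∉ V0 → ∀ y, pvEdge arr n x y →
            y ∈ (ns.foldl (pvDfsStep g fuel) (c0, V0)).2) ∧
         (∀ v ∈ ns, v ∈ (ns.foldl (pvDfsStep g fuel) (c0, V0)).2) ∧
         (ns.foldl (pvDfsStep g fuel) (c0, V0)).1
           = c0 + (((ns.foldl (pvDfsStep g fuel) (c0, V0)).2.length : Int) - (V0.length : Int))) := by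
      intro ns
      induction ns with
      | nil =>
        intro c0 V0 hnd0 hsub0 _ _
        refine ⟨hnd0, fun x hx => hx, hsub0, fun x hx => Or.inl hx, ?_, ?_, by simp⟩
        · intro x hx hxn _ _
          exact absurd hx hxn
        · intro v hv
          exact absurd hv List.not_mem_nil
      | cons v rest ihr =>
        intro c0 V0 hnd0 hsub0 hu0 hedge
        have hev : pvEdge arr n s v := hedge v List.mem_cons_self
        have hedge' : ∀ w ∈ rest, pvEdge arr n s w := fun w hw => hedge w (List.mem_cons_of_mem _ hw)
        rw [List.foldl_cons]
        by_cases hv : v ∈ V0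
        · have hstep : pvDfsStep g fuel (c0, V0) v = (c0, V0) := by
            simp [pvDfsStep, hv]
          rw [hstep]
          obtain ⟨a1, a2, a3, a4, a5, a6, a7⟩ := ihr c0 V0 hnd0 hsub0 hu0 hedge'
          refine ⟨a1, a2, a3, a4, a5, ?_, a7⟩
          intro w hw
          rcases List.mem_cons.mp hw with rfl | hw'
          · exact a2 _ hv
          · exact a6 _ hw'
        · have hstep : pvDfsStep g fuel (c0, V0) v
              = (c0 + (dfsA g fuel v V0).1, (dfsA g fuel v V0).2) := by
            simp [pvDfsStep, hv]
          rw [hstep]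
          have hv0 : 0 ≤ v := hev.2.2.1
          have hvn : v < n := hev.2.2.2.1
          obtain ⟨b1, b2, b3, b4, b5, b6, b7⟩ := ih v V0 hnd0 hsub0 hv hv0 hvn hu0
          have hu1 : pvU n (dfsA g fuel v V0).2 ≤ fuel := Nat.le_trans (pvU_mono n b2) hu0
          obtain ⟨a1, a2, a3, a4, a5, a6, a7⟩ :=
            ihr (c0 + (dfsA g fuel v V0).1) (dfsA g fuel v V0).2 b1 b4 hu1 hedge'
          refine ⟨a1, ?_, a3, ?_, ?_, ?_, ?_⟩
          · intro x hx
            exact a2 _ (b2 _ hx)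
          · intro x hx
            rcases a4 x hx with hx1 | hx2
            · rcases b5 x hx1 with hx3 | hx4
              · exact Or.inl hx3
              · exact Or.inr (pvRTG_head hev hx4)
            · exact Or.inr hx2
          · intro x hx hxn y hy
            by_cases hx1 : x ∈ (dfsA g fuel v V0).2
            · exact a2 _ (b6 x hx1 hxn y hy)
            · exact a5 x hx hx1 y hy
          · intro w hw
            rcases List.mem_cons.mp hw with rfl | hw'
            · exact a2 _ b3
            · exact a6 _ hw'
          · omega
    -- unfold one step of dfsA
    have hV1 : PySem.Set.add V s = V ++ [s] := PySem.Set.add_of_not_mem hs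
    have hnd1 : (PySem.Set.add V s).Nodup := PySem.Set.nodup_add _ _ hnd
    have hsub1 : pvSubR n (PySem.Set.add V s) := by
      intro x hx
      rcases (PySem.Set.mem_add _ _ _).mp hx with hx' | rfl
      · exact hsub x hx'
      · exact ⟨h0, h1⟩
    have hu1 : pvU n (PySem.Set.add V s) ≤ fuel := by
      rw [hV1]
      have := pvU_append_eq n h0 h1 hs
      omega
    have hedges : ∀ v ∈ g.getD s [], pvEdge arr n s v := fun v hv => (Hg s v).mp hv
    obtain ⟨a1, a2, a3, a4, a5, a6, a7⟩ := fold (g.getD s []) 1 (PySem.Set.add V s) hnd1 hsub1 hu1 hedges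
    rw [pvDfsA_succ]
    have hsmem : s ∈ PySem.Set.add V s := (PySem.Set.mem_add _ _ _).mpr (Or.inr rfl)
    have hlen : (PySem.Set.add V s).length = V.length + 1 := by
      rw [hV1, List.length_append, List.length_singleton]
    refine ⟨a1, ?_, a2 _ hsmem, a3, ?_, ?_, by omega⟩
    · intro x hx
      exact a2 _ ((PySem.Set.mem_add _ _ _).mpr (Or.inl hx))
    · intro x hx
      rcases a4 x hx with hx1 | hx2
      · rcases (PySem.Set.mem_add _ _ _).mp hx1 with hx' | rfl
        · exact Or.inl hx'
        · exact Or.inr pvRTG.refl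
      · exact Or.inr hx2
    · intro x hx hxn y hy
      by_cases hx1 : x ∈ PySem.Set.add V s
      · have hxs : x = s := by
          rcases (PySem.Set.mem_add _ _ _).mp hx1 with hx' | rfl
          · exact absurd hx' hxn
          · rfl
        subst hxs
        exact a6 y ((Hg x y).mpr hy)
      · exact a5 x hx hx1 y hy

-- component-level corollary for A's dfs
theorem dfsA_run (arr : List Int) (n : Int) (g : PySem.Dict Int (List Int))
    (Hg : ∀ x y : Int, y ∈ g.getD x [] ↔ pvEdge arr n x y)
    {s : Int} {V : PySem.Set Int} (hnd : V.Nodup) (hsub : pvSubR n V) (hC : pvClosed arr n V)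
    (hs : s ∉ V) (h0 : 0 ≤ s) (h1 : s < n) :
    ((dfsA g (n.toNat + 1) s V).2.Nodup ∧ pvSubR n (dfsA g (n.toNat + 1) s V).2 ∧
     (∀ x, x ∈ (dfsA g (n.toNat + 1) s V).2 ↔ x ∈ V ∨ pvReach arr n s x) ∧
     pvClosed arr n (dfsA g (n.toNat + 1) s V).2 ∧
     (dfsA g (n.toNat + 1) s V).1 = ((dfsA g (n.toNat + 1) s V).2.length : Int) - (V.length : Int)) := by
  have hu : pvU n V ≤ n.toNat + 1 := Nat.le_trans (pvU_le n V) (Nat.le_succ _)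
  obtain ⟨a1, a2, a3, a4, a5, a6, a7⟩ := dfsA_spec arr n g Hg (n.toNat + 1) s V hnd hsub hs h0 h1 hu
  have hclosed : pvClosed arr n (dfsA g (n.toNat + 1) s V).2 := by
    intro x hx y hy
    by_cases hxv : x ∈ V
    · exact a2 _ (hC x hxv y hy)
    · exact a6 x hx hxv y hy
  refine ⟨a1, a4, ?_, hclosed, a7⟩
  intro x
  constructor
  · exact a5 x
  · rintro (hx | hx)
    · exact a2 _ hx
    · exact pvReach_mem_closed arr n hclosed a3 hx

-- ----- B's flood fill -----

-- the body of B's inner for-loop, named so the proofs can rewrite with it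
def pvBfsStep (arr : List Int) (n : Int) (j : Int) :
    List Int × PySem.Set Int × Int → Int → List Int × PySem.Set Int × Int := fun st k =>
  if PySem.Set.contains st.2.1 k then st
  else if 1 < pyGcd (PySem.List.pyGetD arr j 0) (PySem.List.pyGetD arr k 0) then
    (st.1 ++ [k], PySem.Set.add st.2.1 k, st.2.2 + 1)
  else st

theorem bfsB_spec (arr : List Int) (n : Int) (root : Int) :
    ∀ (fuel : Nat) (stack : List Int) (vis : PySem.Set Int) (size : Int),
      vis.Nodup → pvSubR n vis → (∀ x ∈ stack, x ∈ vis) →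
      2 * pvU n vis + stack.length ≤ fuel →
      (∀ x ∈ vis, x ∈ stack ∨ ∀ y, pvEdge arr n x y → y ∈ vis) →
      (∀ s' ∈ stack, pvReach arr n root s') →
      ((bfsB arr n fuel stack vis size).2.Nodup ∧
       (∀ x ∈ vis, x ∈ (bfsB arr n fuel stack vis size).2) ∧
       pvSubR n (bfsB arr n fuel stack vis size).2 ∧
       (∀ x ∈ (bfsB arr n fuel stack vis size).2, x ∈ vis ∨ pvReach arr n root x) ∧
       pvClosed arr n (bfsB arr n fuel stack vis size).2 ∧
       (bfsB arr n fuel stack vis size).1 =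
         size + (((bfsB arr n fuel stack vis size).2.length : Int) - (vis.length : Int))) := by
  intro fuel
  induction fuel with
  | zero =>
    intro stack vis size hnd hsub hsv hfuel hinv _
    cases stack with
    | nil =>
      refine ⟨hnd, fun x hx => hx, hsub, fun x hx => Or.inl hx, ?_,
        by show size = size + ((vis.length : Int) - vis.length); omega⟩
      intro x hx y hy
      rcases hinv x hx with hx' | hx'
      · exact absurd hx' List.not_mem_nil
      · exact hx' y hy
    | cons a t =>
      exfalso
      simp only [List.length_cons] at hfuel
      omega
  | succ fuel ih =>
    intro stack vis size hnd hsub hsv hfuel hinv hreach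
    cases hlast : stack.getLast? with
    | none =>
      have hsnil : stack = [] := List.getLast?_eq_none_iff.mp hlast
      subst hsnil
      have hrw : bfsB arr n (fuel + 1) [] vis size = (size, vis) := by
        rw [bfsB]
        exact rfl
      rw [hrw]
      refine ⟨hnd, fun x hx => hx, hsub, fun x hx => Or.inl hx, ?_, by simp⟩
      intro x hx y hy
      rcases hinv x hx with hx' | hx'
      · exact absurd hx' List.not_mem_nil
      · exact hx' y hy
    | some j =>
      obtain ⟨rest0, hre0⟩ := List.getLast?_eq_some_iff.mp hlast
      have hdrop : stack.dropLast = rest0 := by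
        rw [hre0, List.dropLast_concat]
      have hre : stack = stack.dropLast ++ [j] := by
        rw [hdrop, hre0]
      have hjvis : j ∈ vis := hsv j (by rw [hre]; exact List.mem_append.mpr (Or.inr List.mem_cons_self))
      have hj0 : 0 ≤ j := (hsub j hjvis).1
      have hjn : j < n := (hsub j hjvis).2
      -- the inner loop over range(n)
      have fold : ∀ (ks : List Int) (st0 : List Int) (vis0 : PySem.Set Int) (sz0 : Int),
          vis0.Nodup → pvSubR n vis0 → j ∈ vis0 → (∀ k ∈ ks, 0 ≤ k ∧ k < n) →
          ((ks.foldl (pvBfsStep arr n j) (st0, vis0, sz0)).2.1.Nodup ∧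
           (∀ x ∈ vis0, x ∈ (ks.foldl (pvBfsStep arr n j) (st0, vis0, sz0)).2.1) ∧
           pvSubR n (ks.foldl (pvBfsStep arr n j) (st0, vis0, sz0)).2.1 ∧
           (∀ x ∈ (ks.foldl (pvBfsStep arr n j) (st0, vis0, sz0)).2.1, x ∈ vis0 ∨ pvEdge arr n j x) ∧
           (∀ k ∈ ks, pvEdge arr n j k → k ∈ (ks.foldl (pvBfsStep arr n j) (st0, vis0, sz0)).2.1) ∧
           (∀ x, x ∈ (ks.foldl (pvBfsStep arr n j) (st0, vis0, sz0)).1 ↔ x ∈ st0 ∨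
              (x ∈ (ks.foldl (pvBfsStep arr n j) (st0, vis0, sz0)).2.1 ∧ x ∉ vis0)) ∧
           ((ks.foldl (pvBfsStep arr n j) (st0, vis0, sz0)).2.2 = sz0 +
              (((ks.foldl (pvBfsStep arr n j) (st0, vis0, sz0)).2.1.length : Int) - (vis0.length : Int))) ∧
           ((ks.foldl (pvBfsStep arr n j) (st0, vis0, sz0)).1.length + vis0.length = st0.length +
              (ks.foldl (pvBfsStep arr n j) (st0, vis0, sz0)).2.1.length) ∧
           (pvU n (ks.foldl (pvBfsStep arr n j) (st0, vis0, sz0)).2.1 +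
              (ks.foldl (pvBfsStep arr n j) (st0, vis0, sz0)).2.1.length = pvU n vis0 + vis0.length)) := by
        intro ks
        induction ks with
        | nil =>
          intro st0 vis0 sz0 hnd0 hsub0 _ _
          refine ⟨hnd0, fun x hx => hx, hsub0, fun x hx => Or.inl hx,
            fun k hk => absurd hk List.not_mem_nil, ?_, by simp, by simp, rfl⟩
          intro x
          constructor
          · exact fun hx => Or.inl hx
          · rintro (hx | ⟨hx1, hx2⟩)
            · exact hx
            · exact absurd hx1 hx2
        | cons k t iht =>
          intro st0 vis0 sz0 hnd0 hsub0 hj0' hks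
          have hk0 : 0 ≤ k := (hks k List.mem_cons_self).1
          have hkn : k < n := (hks k List.mem_cons_self).2
          have hks' : ∀ w ∈ t, 0 ≤ w ∧ w < n := fun w hw => hks w (List.mem_cons_of_mem _ hw)
          rw [List.foldl_cons]
          by_cases hkv : k ∈ vis0
          · have hstep : pvBfsStep arr n j (st0, vis0, sz0) k = (st0, vis0, sz0) := by
              simp [pvBfsStep, hkv]
            rw [hstep]
            obtain ⟨a1, a2, a3, a4, a5, a6, a7, a8, a9⟩ := iht st0 vis0 sz0 hnd0 hsub0 hj0' hks'
            refine ⟨a1, a2, a3, a4, ?_, a6, a7, a8, a9⟩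
            intro w hw hew
            rcases List.mem_cons.mp hw with rfl | hw'
            · exact a2 _ hkv
            · exact a5 _ hw' hew
          · by_cases hg : 1 < pyGcd (PySem.List.pyGetD arr j 0) (PySem.List.pyGetD arr k 0)
            · have hstep : pvBfsStep arr n j (st0, vis0, sz0) k
                  = (st0 ++ [k], PySem.Set.add vis0 k, sz0 + 1) := by
                simp [pvBfsStep, hkv, hg]
              rw [hstep]
              have hjk : j ≠ k := fun h => hkv (h ▸ hj0')
              have hek : pvEdge arr n j k := ⟨hj0, hjn, hk0, hkn, hjk, hg⟩
              have hadd : PySem.Set.add vis0 k = vis0 ++ [k] := PySem.Set.add_of_not_mem hkv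
              have hnd1 : (PySem.Set.add vis0 k).Nodup := PySem.Set.nodup_add _ _ hnd0
              have hsub1 : pvSubR n (PySem.Set.add vis0 k) := by
                intro x hx
                rcases (PySem.Set.mem_add _ _ _).mp hx with hx' | rfl
                · exact hsub0 x hx'
                · exact ⟨hk0, hkn⟩
              have hj1 : j ∈ PySem.Set.add vis0 k := (PySem.Set.mem_add _ _ _).mpr (Or.inl hj0')
              obtain ⟨a1, a2, a3, a4, a5, a6, a7, a8, a9⟩ :=
                iht (st0 ++ [k]) (PySem.Set.add vis0 k) (sz0 + 1) hnd1 hsub1 hj1 hks'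
              have hkfin : k ∈ (t.foldl (pvBfsStep arr n j) (st0 ++ [k], PySem.Set.add vis0 k, sz0 + 1)).2.1 :=
                a2 _ ((PySem.Set.mem_add _ _ _).mpr (Or.inr rfl))
              have hlen : (PySem.Set.add vis0 k).length = vis0.length + 1 := by
                rw [hadd, List.length_append, List.length_singleton]
              have hU : pvU n (PySem.Set.add vis0 k) + 1 = pvU n vis0 := by
                rw [hadd]
                exact pvU_append_eq n hk0 hkn hkv
              have hlen2 : (st0 ++ [k]).length = st0.length + 1 := by
                rw [List.length_append, List.length_singleton]
              refine ⟨a1, ?_, a3, ?_, ?_, ?_, by omega, by omega, by omega⟩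
              · intro x hx
                exact a2 _ ((PySem.Set.mem_add _ _ _).mpr (Or.inl hx))
              · intro x hx
                rcases a4 x hx with hx1 | hx2
                · rcases (PySem.Set.mem_add _ _ _).mp hx1 with hx' | rfl
                  · exact Or.inl hx'
                  · exact Or.inr hek
                · exact Or.inr hx2
              · intro w hw hew
                rcases List.mem_cons.mp hw with rfl | hw'
                · exact hkfin
                · exact a5 _ hw' hew
              · intro x
                rw [a6 x]
                constructor
                · rintro (hx | hx)
                  · rcases List.mem_append.mp hx with hx' | hx'
                    · exact Or.inl hx'
                    · have hxk : x = k := by simpa using hx'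
                      subst hxk
                      exact Or.inr ⟨hkfin, hkv⟩
                  · obtain ⟨hx1, hx2⟩ := hx
                    have hxv : x ∉ vis0 := fun h => hx2 ((PySem.Set.mem_add _ _ _).mpr (Or.inl h))
                    exact Or.inr ⟨hx1, hxv⟩
                · rintro (hx | ⟨hx1, hx2⟩)
                  · exact Or.inl (List.mem_append.mpr (Or.inl hx))
                  · by_cases hxk : x = k
                    · subst hxk
                      exact Or.inl (List.mem_append.mpr (Or.inr (by simp)))
                    · refine Or.inr ⟨hx1, ?_⟩
                      intro hmem
                      rcases (PySem.Set.mem_add _ _ _).mp hmem with h' | h'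
                      · exact hx2 h'
                      · exact hxk h'
            · have hstep : pvBfsStep arr n j (st0, vis0, sz0) k = (st0, vis0, sz0) := by
                simp [pvBfsStep, hkv, hg]
              rw [hstep]
              obtain ⟨a1, a2, a3, a4, a5, a6, a7, a8, a9⟩ := iht st0 vis0 sz0 hnd0 hsub0 hj0' hks'
              refine ⟨a1, a2, a3, a4, ?_, a6, a7, a8, a9⟩
              intro w hw hew
              rcases List.mem_cons.mp hw with rfl | hw'
              · exact absurd hew.2.2.2.2.2 hg
              · exact a5 _ hw' hew
      -- apply the inner loop, then recurse
      obtain ⟨a1, a2, a3, a4, a5, a6, a7, a8, a9⟩ :=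
        fold (PySem.List.pyRange 0 n 1) stack.dropLast vis size hnd hsub hjvis
          (fun k hk => by
            have := (PySem.List.mem_pyRange_one).mp hk
            omega)
      have hrw : bfsB arr n (fuel + 1) stack vis size =
          bfsB arr n fuel
            ((PySem.List.pyRange 0 n 1).foldl (pvBfsStep arr n j) (stack.dropLast, vis, size)).1
            ((PySem.List.pyRange 0 n 1).foldl (pvBfsStep arr n j) (stack.dropLast, vis, size)).2.1
            ((PySem.List.pyRange 0 n 1).foldl (pvBfsStep arr n j) (stack.dropLast, vis, size)).2.2 := by
        rw [bfsB, hlast]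
        exact rfl
      have hstack' : ∀ x ∈ ((PySem.List.pyRange 0 n 1).foldl (pvBfsStep arr n j) (stack.dropLast, vis, size)).1,
          x ∈ ((PySem.List.pyRange 0 n 1).foldl (pvBfsStep arr n j) (stack.dropLast, vis, size)).2.1 := by
        intro x hx
        rcases (a6 x).mp hx with hx' | hx'
        · exact a2 _ (hsv x (by rw [hre]; exact List.mem_append.mpr (Or.inl hx')))
        · exact hx'.1
      have hslen : stack.length = stack.dropLast.length + 1 := by
        rw [hre, List.length_append, List.length_singleton, List.dropLast_concat]
      have humono : pvU n ((PySem.List.pyRange 0 n 1).foldl (pvBfsStep arr n j) (stack.dropLast, vis, size)).2.1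
          ≤ pvU n vis := pvU_mono n a2
      have hfuel' : 2 * pvU n ((PySem.List.pyRange 0 n 1).foldl (pvBfsStep arr n j) (stack.dropLast, vis, size)).2.1
          + ((PySem.List.pyRange 0 n 1).foldl (pvBfsStep arr n j) (stack.dropLast, vis, size)).1.length ≤ fuel := by
        omega
      have hinv' : ∀ x ∈ ((PySem.List.pyRange 0 n 1).foldl (pvBfsStep arr n j) (stack.dropLast, vis, size)).2.1,
          x ∈ ((PySem.List.pyRange 0 n 1).foldl (pvBfsStep arr n j) (stack.dropLast, vis, size)).1 ∨
          ∀ y, pvEdge arr n x y →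
            y ∈ ((PySem.List.pyRange 0 n 1).foldl (pvBfsStep arr n j) (stack.dropLast, vis, size)).2.1 := by
        intro x hx
        by_cases hxv : x ∈ vis
        · rcases hinv x hxv with hxs | hxc
          · rw [hre] at hxs
            rcases List.mem_append.mp hxs with hxr | hxj
            · exact Or.inl ((a6 x).mpr (Or.inl hxr))
            · have hxj' : x = j := by simpa using hxj
              subst hxj'
              right
              intro y hy
              refine a5 y ?_ hy
              exact (PySem.List.mem_pyRange_one).mpr ⟨hy.2.2.1, hy.2.2.2.1⟩
          · right
            intro y hy
            exact a2 _ (hxc y hy)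
        · exact Or.inl ((a6 x).mpr (Or.inr ⟨hx, hxv⟩))
      have hreach' : ∀ s' ∈ ((PySem.List.pyRange 0 n 1).foldl (pvBfsStep arr n j) (stack.dropLast, vis, size)).1,
          pvReach arr n root s' := by
        intro s' hs'
        rcases (a6 s').mp hs' with hx' | hx'
        · exact hreach s' (by rw [hre]; exact List.mem_append.mpr (Or.inl hx'))
        · rcases a4 s' hx'.1 with hv | he
          · exact absurd hv hx'.2
          · exact pvRTG.tail (hreach j (by rw [hre]; exact List.mem_append.mpr (Or.inr List.mem_cons_self))) he
      obtain ⟨b1, b2, b3, b4, b5, b6⟩ := ih _ _ _ a1 a3 hstack' hfuel' hinv' hreach'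
      rw [hrw]
      refine ⟨b1, ?_, b3, ?_, b5, ?_⟩
      · intro x hx
        exact b2 _ (a2 _ hx)
      · intro x hx
        rcases b4 x hx with hx1 | hx2
        · rcases a4 x hx1 with hxv | hxe
          · exact Or.inl hxv
          · exact Or.inr (pvRTG.tail
              (hreach j (by rw [hre]; exact List.mem_append.mpr (Or.inr List.mem_cons_self))) hxe)
        · exact Or.inr hx2
      · omega

-- component-level corollary for B's flood fill
theorem bfsB_run (arr : List Int) (n : Int)
    {s : Int} {V : PySem.Set Int} (hnd : V.Nodup) (hsub : pvSubR n V) (hC : pvClosed arr n V)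
    (hs : s ∉ V) (h0 : 0 ≤ s) (h1 : s < n) :
    ((bfsB arr n (2 * n.toNat + 2) [s] (PySem.Set.add V s) 1).2.Nodup ∧
     pvSubR n (bfsB arr n (2 * n.toNat + 2) [s] (PySem.Set.add V s) 1).2 ∧
     (∀ x, x ∈ (bfsB arr n (2 * n.toNat + 2) [s] (PySem.Set.add V s) 1).2 ↔ x ∈ V ∨ pvReach arr n s x) ∧
     pvClosed arr n (bfsB arr n (2 * n.toNat + 2) [s] (PySem.Set.add V s) 1).2 ∧
     (bfsB arr n (2 * n.toNat + 2) [s] (PySem.Set.add V s) 1).1 =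
       ((bfsB arr n (2 * n.toNat + 2) [s] (PySem.Set.add V s) 1).2.length : Int) - (V.length : Int)) := by
  have hadd : PySem.Set.add V s = V ++ [s] := PySem.Set.add_of_not_mem hs
  have hnd1 : (PySem.Set.add V s).Nodup := PySem.Set.nodup_add _ _ hnd
  have hsub1 : pvSubR n (PySem.Set.add V s) := by
    intro x hx
    rcases (PySem.Set.mem_add _ _ _).mp hx with hx' | rfl
    · exact hsub x hx'
    · exact ⟨h0, h1⟩
  have hsmem : s ∈ PySem.Set.add V s := (PySem.Set.mem_add _ _ _).mpr (Or.inr rfl)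
  have hsv : ∀ x ∈ ([s] : List Int), x ∈ PySem.Set.add V s := by
    intro x hx
    have hxs : x = s := by simpa using hx
    exact hxs ▸ hsmem
  have hfuel : 2 * pvU n (PySem.Set.add V s) + ([s] : List Int).length ≤ 2 * n.toNat + 2 := by
    have := pvU_le n (PySem.Set.add V s)
    simp only [List.length_singleton]
    omega
  have hinv : ∀ x ∈ PySem.Set.add V s, x ∈ ([s] : List Int) ∨ ∀ y, pvEdge arr n x y → y ∈ PySem.Set.add V s := by
    intro x hx
    rcases (PySem.Set.mem_add _ _ _).mp hx with hx' | rfl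
    · right
      intro y hy
      exact (PySem.Set.mem_add _ _ _).mpr (Or.inl (hC x hx' y hy))
    · exact Or.inl (by simp)
  have hreach : ∀ s' ∈ ([s] : List Int), pvReach arr n s s' := by
    intro s' hs'
    have hxs : s' = s := by simpa using hs'
    exact hxs ▸ pvRTG.refl
  obtain ⟨b1, b2, b3, b4, b5, b6⟩ :=
    bfsB_spec arr n s (2 * n.toNat + 2) [s] (PySem.Set.add V s) 1 hnd1 hsub1 hsv hfuel hinv hreach
  refine ⟨b1, b3, ?_, b5, ?_⟩
  · intro x
    constructor
    · intro hx
      rcases b4 x hx with hx1 | hx2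
      · rcases (PySem.Set.mem_add _ _ _).mp hx1 with hx' | rfl
        · exact Or.inl hx'
        · exact Or.inr pvRTG.refl
      · exact Or.inr hx2
    · rintro (hx | hx)
      · exact b2 _ ((PySem.Set.mem_add _ _ _).mpr (Or.inl hx))
      · exact pvReach_mem_closed arr n b5 (b2 _ hsmem) hx
  · have hlen : (PySem.Set.add V s).length = V.length + 1 := by
      rw [hadd, List.length_append, List.length_singleton]
    omega

-- named loop bodies of the two top-level loops (definitionally those of the ports)
def pvTopA (g : PySem.Dict Int (List Int)) (n : Int) :
    Int × PySem.Set Int → Int → Int × PySem.Set Int := fun st i =>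
  if PySem.Set.contains st.2 i then st
  else
    let r := dfsA g (n.toNat + 1) i st.2
    (max st.1 r.1, r.2)

def pvTopB (arr : List Int) (n : Int) :
    Int × PySem.Set Int → Int → Int × PySem.Set Int := fun st i =>
  if PySem.Set.contains st.2 i then st
  else
    let r := bfsB arr n (2 * n.toNat + 2) [i] (PySem.Set.add st.2 i) 1
    (max st.1 r.1, r.2)

-- the two top-level loops keep equal maxima and membership-equal visited sets
theorem top_loop (arr : List Int) (n : Int) (g : PySem.Dict Int (List Int))
    (Hg : ∀ x y : Int, y ∈ g.getD x [] ↔ pvEdge arr n x y) :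
    ∀ (l : List Int) (m : Int) (VA VB : PySem.Set Int),
      VA.Nodup → VB.Nodup → (∀ x, x ∈ VA ↔ x ∈ VB) → pvSubR n VA → pvClosed arr n VA →
      (∀ i ∈ l, 0 ≤ i ∧ i < n) →
      (l.foldl (pvTopA g n) (m, VA)).1 = (l.foldl (pvTopB arr n) (m, VB)).1 := by
  intro l
  induction l with
  | nil => intro m VA VB _ _ _ _ _ _; rfl
  | cons i t iht =>
    intro m VA VB hndA hndB hmem hsub hC hl
    have hi0 : 0 ≤ i := (hl i List.mem_cons_self).1
    have hin : i < n := (hl i List.mem_cons_self).2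
    have hl' : ∀ w ∈ t, 0 ≤ w ∧ w < n := fun w hw => hl w (List.mem_cons_of_mem _ hw)
    rw [List.foldl_cons, List.foldl_cons]
    by_cases hiA : i ∈ VA
    · have hiB : i ∈ VB := (hmem i).mp hiA
      have hstepA : pvTopA g n (m, VA) i = (m, VA) := by
        simp [pvTopA, hiA]
      have hstepB : pvTopB arr n (m, VB) i = (m, VB) := by
        simp [pvTopB, hiB]
      rw [hstepA, hstepB]
      exact iht m VA VB hndA hndB hmem hsub hC hl'
    · have hiB : i ∉ VB := fun h => hiA ((hmem i).mpr h)
      have hstepA : pvTopA g n (m, VA) i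
          = (max m (dfsA g (n.toNat + 1) i VA).1, (dfsA g (n.toNat + 1) i VA).2) := by
        simp [pvTopA, hiA]
      have hstepB : pvTopB arr n (m, VB) i
          = (max m (bfsB arr n (2 * n.toNat + 2) [i] (PySem.Set.add VB i) 1).1,
             (bfsB arr n (2 * n.toNat + 2) [i] (PySem.Set.add VB i) 1).2) := by
        simp [pvTopB, hiB]
      rw [hstepA, hstepB]
      have hsubB : pvSubR n VB := fun x hx => hsub x ((hmem x).mpr hx)
      have hCB : pvClosed arr n VB := by
        intro x hx y hy
        exact (hmem y).mp (hC x ((hmem x).mpr hx) y hy)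
      obtain ⟨dA1, dA2, dA3, dA4, dA5⟩ := dfsA_run arr n g Hg hndA hsub hC hiA hi0 hin
      obtain ⟨dB1, dB2, dB3, dB4, dB5⟩ := bfsB_run arr n hndB hsubB hCB hiB hi0 hin
      have hmem' : ∀ x, x ∈ (dfsA g (n.toNat + 1) i VA).2 ↔
          x ∈ (bfsB arr n (2 * n.toNat + 2) [i] (PySem.Set.add VB i) 1).2 := by
        intro x
        rw [dA3 x, dB3 x, hmem x]
      have hlenV : VA.length = VB.length := pvLenEq VA VB hndA hndB hmem
      have hlenV' : (dfsA g (n.toNat + 1) i VA).2.length =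
          (bfsB arr n (2 * n.toNat + 2) [i] (PySem.Set.add VB i) 1).2.length :=
        pvLenEq _ _ dA1 dB1 hmem'
      have hcnt : (dfsA g (n.toNat + 1) i VA).1 =
          (bfsB arr n (2 * n.toNat + 2) [i] (PySem.Set.add VB i) 1).1 := by
        omega
      rw [hcnt]
      exact iht _ _ _ dA1 dB1 hmem' dA2 dA4 hl'

-- ===== VERDICT (by name: the statement is the Claim_ definition above) =====
theorem largestComponent_spec : Claim_equal_largestComponent := by
  intro arr n _ _
  unfold Spec_largestComponent largestComponent largestComponent_alt
  refine top_loop arr n (buildGraphA arr n) (mem_buildGraphA arr n)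
    (PySem.List.pyRange 0 n 1) 1 PySem.Set.empty PySem.Set.empty
    List.nodup_nil List.nodup_nil (fun x => Iff.rfl) (fun x hx => absurd hx List.not_mem_nil)
    (fun x hx _ => absurd hx List.not_mem_nil) ?_
  intro i hi
  have := (PySem.List.mem_pyRange_one).mp hi
  omega
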